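-- pv_equiv track=rewrite | github.com/srillaert/project-euler | p043.py | get_available_digit
-- ===== SOURCE A (Python) =====
-- def get_available_digit(number):
-- 	is_digit_used = [False] * 10
-- 	for i in range(9):
-- 		digit = number % 10
-- 		if is_digit_used[digit]:
-- 			return -1 # not a pandigital number
-- 		is_digit_used[digit] = True
-- 		number //= 10
-- 	for i in range(10):
-- 		if not is_digit_used[i]:
-- 			return i
-- ===== SOURCE B (Python) =====
-- def get_available_digit(number):
--     d = [(number // 10**i) % 10 for i in range(9)]
--     if len(set(d)) != 9:
--         return -1
--     return 45 - sum(d)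
-- ===== Notes on version B (the rewrite author's own statement) =====
-- stated objective: simpler
-- what changed: Replaces the boolean used-digit table with its mark-and-scan loops by extracting the nine low digits into a list, checking pandigitality via set cardinality, and returning the missing digit by the closed form (total of digits zero through nine) minus the digit sum.
import Mathlib
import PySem

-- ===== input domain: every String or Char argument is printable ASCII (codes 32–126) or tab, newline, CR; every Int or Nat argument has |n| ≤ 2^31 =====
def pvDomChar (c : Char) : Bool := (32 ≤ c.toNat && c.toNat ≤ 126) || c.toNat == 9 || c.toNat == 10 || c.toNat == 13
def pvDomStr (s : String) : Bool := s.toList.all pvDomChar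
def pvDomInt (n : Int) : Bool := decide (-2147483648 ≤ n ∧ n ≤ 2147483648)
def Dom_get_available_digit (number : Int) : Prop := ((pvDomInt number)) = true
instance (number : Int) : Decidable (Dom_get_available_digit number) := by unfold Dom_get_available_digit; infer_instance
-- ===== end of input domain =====

-- B replaces A's boolean used-digit table and find-the-missing scan by a digit list,
-- a set-cardinality duplicate check and a closed-form digit-sum subtraction (objective: simpler).


-- ===== PORT A =====
-- second loop: 'for i in range(10): if not is_digit_used[i]: return i'.
-- The fall-through (Python's implicit 'return None') is unreachable: at most 9 flags are set.
def pvScanA : List Int → List Bool → Int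
  | [], _ => 0
  | i :: rest, used => if used.getD i.toNat false then pvScanA rest used else i

-- first loop, counted down from 9; 'digit' is always in [0,10) so getD/set at digit.toNat
-- are exactly Python's is_digit_used[digit] read/assignment.
def pvLoopA : Nat → Int → List Bool → Int
  | 0, _, used => pvScanA (PySem.List.pyRange 0 10 1) used
  | (k+1), number, used =>
    let digit := PySem.Int.mod number 10
    if used.getD digit.toNat false then -1
    else pvLoopA k (PySem.Int.floordiv number 10) (used.set digit.toNat true)

def get_available_digit (number : Int) : Int :=
  pvLoopA 9 number (List.replicate 10 false)

-- ===== PORT B =====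
def get_available_digit_alt (number : Int) : Int :=
  let d := (List.range 9).map (fun i => PySem.Int.mod (PySem.Int.floordiv number ((10:Int) ^ i)) 10)
  if (PySem.Set.ofList d).length ≠ 9 then -1 else 45 - d.sum

-- ===== PRECONDITION & SPEC =====
def Spec_get_available_digit (number : Int) (out : Int) : Prop := out = get_available_digit_alt number
instance (number : Int) (out : Int) : Decidable (Spec_get_available_digit number out) := by unfold Spec_get_available_digit; infer_instance

-- ===== CLAIM (what is proved, stated in full; the proofs are below) =====
def Claim_equal_get_available_digit : Prop := ∀ (number : Int), Dom_get_available_digit number → Spec_get_available_digit number (get_available_digit number)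

-- ===== LEMMAS AND PROOFS =====

-- the low k digits of n, low-order first, with Python's floor semantics
def pvDLow : Int → Nat → List Int
  | _, 0 => []
  | n, (k+1) => PySem.Int.mod n 10 :: pvDLow (PySem.Int.floordiv n 10) k

-- the boolean table whose j-th slot says whether digit j has been seen
def pvMark (seen : List Int) : List Bool :=
  [decide ((0:Int) ∈ seen), decide ((1:Int) ∈ seen), decide ((2:Int) ∈ seen),
   decide ((3:Int) ∈ seen), decide ((4:Int) ∈ seen), decide ((5:Int) ∈ seen),
   decide ((6:Int) ∈ seen), decide ((7:Int) ∈ seen), decide ((8:Int) ∈ seen),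
   decide ((9:Int) ∈ seen)]

-- A's loop re-expressed over the list of remaining digits and the list of seen digits
def pvProcD : List Int → List Int → Int
  | seen, [] => pvScanA (PySem.List.pyRange 0 10 1) (pvMark seen)
  | seen, d :: ds => if d ∈ seen then -1 else pvProcD (seen ++ [d]) ds

lemma pvDLow_map : ∀ (k : Nat) (n : Int),
    pvDLow n k = (List.range k).map (fun i => PySem.Int.mod (PySem.Int.floordiv n ((10:Int) ^ i)) 10) := by
  intro k
  induction k with
  | zero => intro n; rfl
  | succ k ih =>
    intro n
    have hdiv : ∀ (m : Int) (i : Nat),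
        PySem.Int.floordiv (PySem.Int.floordiv m 10) ((10:Int) ^ i) = PySem.Int.floordiv m ((10:Int) ^ (i+1)) := by
      intro m i
      have h1 : PySem.Int.floordiv m 10 = m / 10 := PySem.Int.floordiv_eq_ediv_of_pos (by norm_num)
      have h2 : PySem.Int.floordiv (m / 10) ((10:Int) ^ i) = (m / 10) / ((10:Int) ^ i) :=
        PySem.Int.floordiv_eq_ediv_of_pos (by positivity)
      have h3 : PySem.Int.floordiv m ((10:Int) ^ (i+1)) = m / ((10:Int) ^ (i+1)) :=
        PySem.Int.floordiv_eq_ediv_of_pos (by positivity)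
      rw [h1, h2, h3, Int.ediv_ediv_of_nonneg (by norm_num : (0:Int) ≤ 10), pow_succ, mul_comm]
    simp only [pvDLow, ih, List.range_succ_eq_map, List.map_cons, List.map_map]
    congr 1
    · rw [show ((10:Int) ^ 0) = 1 by norm_num]
      have : PySem.Int.floordiv n 1 = n := by
        rw [PySem.Int.floordiv_eq_ediv_of_pos (by norm_num)]; exact Int.ediv_one n
      rw [this]
    · apply List.map_congr_left
      intro i _
      simp only [Function.comp]
      rw [hdiv]

lemma pvDLow_mem_bounds : ∀ (k : Nat) (n : Int) (x : Int), x ∈ pvDLow n k → 0 ≤ x ∧ x < 10 := by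
  intro k
  induction k with
  | zero => intro n x hx; simp [pvDLow] at hx
  | succ k ih =>
    intro n x hx
    simp only [pvDLow, List.mem_cons] at hx
    rcases hx with h | h
    · subst h
      exact ⟨PySem.Int.mod_nonneg n (by norm_num), PySem.Int.mod_lt n (by norm_num)⟩
    · exact ih _ _ h

lemma pvDLow_length (k : Nat) (n : Int) : (pvDLow n k).length = k := by
  rw [pvDLow_map]; simp

lemma pvMark_getD (seen : List Int) {d : Int} (h0 : 0 ≤ d) (h9 : d < 10) :
    (pvMark seen).getD d.toNat false = decide (d ∈ seen) := by
  interval_cases d <;> simp [pvMark]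

lemma pvMark_set (seen : List Int) {d : Int} (h0 : 0 ≤ d) (h9 : d < 10) :
    (pvMark seen).set d.toNat true = pvMark (seen ++ [d]) := by
  interval_cases d <;>
    simp [pvMark, List.mem_append]

lemma pvMark_nil : pvMark [] = List.replicate 10 false := by decide

lemma pvLoopA_mark : ∀ (k : Nat) (n : Int) (seen : List Int),
    pvLoopA k n (pvMark seen) = pvProcD seen (pvDLow n k) := by
  intro k
  induction k with
  | zero => intro n seen; rfl
  | succ k ih =>
    intro n seen
    have h0 : 0 ≤ PySem.Int.mod n 10 := PySem.Int.mod_nonneg n (by norm_num)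
    have h9 : PySem.Int.mod n 10 < 10 := PySem.Int.mod_lt n (by norm_num)
    simp only [pvLoopA, pvDLow, pvProcD]
    rw [pvMark_getD seen h0 h9, pvMark_set seen h0 h9]
    simp only [decide_eq_true_eq]
    by_cases hmem : PySem.Int.mod n 10 ∈ seen
    · rw [if_pos hmem, if_pos hmem]
    · rw [if_neg hmem, if_neg hmem, ih]

lemma pvProcD_neg : ∀ (ds seen : List Int), seen.Nodup → ¬ (seen ++ ds).Nodup →
    pvProcD seen ds = -1 := by
  intro ds
  induction ds with
  | nil => intro seen h1 h2; simp at h2; exact absurd h1 h2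
  | cons d ds ih =>
    intro seen h1 h2
    by_cases hmem : d ∈ seen
    · simp [pvProcD, hmem]
    · simp only [pvProcD, hmem, if_false]
      apply ih
      · simp [List.nodup_append, h1]
        exact fun a ha hc => hmem (hc ▸ ha)
      · intro hc
        apply h2
        rw [show seen ++ d :: ds = (seen ++ [d]) ++ ds by simp]
        exact hc

lemma pvProcD_pos : ∀ (ds seen : List Int), (seen ++ ds).Nodup →
    pvProcD seen ds = pvScanA (PySem.List.pyRange 0 10 1) (pvMark (seen ++ ds)) := by
  intro ds
  induction ds with
  | nil => intro seen h; simp [pvProcD]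
  | cons d ds ih =>
    intro seen h
    have hmem : d ∉ seen := by
      intro hc
      have := List.disjoint_of_nodup_append h
      exact this hc (by simp)
    simp only [pvProcD, hmem, if_false]
    rw [ih (seen ++ [d]) (by rw [show (seen ++ [d]) ++ ds = seen ++ d :: ds by simp]; exact h)]
    rw [show (seen ++ [d]) ++ ds = seen ++ d :: ds by simp]

lemma pvScanA_first : ∀ (l : List Int) (used : List Bool) (m : Int), m ∈ l →
    (∀ j ∈ l, (used.getD j.toNat false = false ↔ j = m)) → pvScanA l used = m := by
  intro l
  induction l with
  | nil => intro used m hm _; simp at hm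
  | cons i rest ih =>
    intro used m hm hiff
    cases hu : used.getD i.toNat false with
    | false =>
      simp only [pvScanA, hu]
      exact (hiff i (by simp)).mp hu
    | true =>
      have hne : i ≠ m := by
        intro hc
        have := (hiff i (by simp)).mpr hc
        rw [hu] at this; exact absurd this (by simp)
      have hm' : m ∈ rest := by
        rcases List.mem_cons.mp hm with h | h
        · exact absurd h.symm hne
        · exact h
      simp only [pvScanA, hu, if_true]
      exact ih used m hm' (fun j hj => hiff j (by simp [hj]))

lemma pvOfList_sublist : ∀ (l : List Int), (PySem.Set.ofList l).Sublist l := by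
  intro l
  induction l using List.reverseRecOn with
  | nil => simp [PySem.Set.ofList_nil]
  | append_singleton xs x ih =>
    rw [PySem.Set.ofList_append_singleton, PySem.Set.add]
    by_cases h : PySem.Set.contains (PySem.Set.ofList xs) x
    · simp only [h, if_true]
      exact ih.trans (List.sublist_append_left xs [x])
    · simp only [h]
      exact List.Sublist.append ih (List.Sublist.refl [x])

lemma pvOfList_len_eq_iff_nodup (l : List Int) :
    (PySem.Set.ofList l).length = l.length ↔ l.Nodup := by
  constructor
  · intro h
    have heq := (pvOfList_sublist l).eq_of_length h
    rw [← heq]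
    exact PySem.Set.nodup_ofList l
  · intro h
    rw [PySem.Set.ofList_eq_self_of_nodup _ h]

-- the pandigital case: nine distinct digits in [0,10); the missing one is both
-- A's first unused slot and B's 45 - sum
lemma pv_main (ds : List Int) (hlen : ds.length = 9)
    (hbd : ∀ x ∈ ds, 0 ≤ x ∧ x < 10) (hnd : ds.Nodup) :
    ∃ m : Int, pvScanA (PySem.List.pyRange 0 10 1) (pvMark ds) = m ∧ 45 - ds.sum = m := by
  classical
  set S : Finset Int := Finset.Icc 0 9 with hS
  set T : Finset Int := ds.toFinset with hT
  have hTS : T ⊆ S := by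
    intro x hx
    rw [hT, List.mem_toFinset] at hx
    have := hbd x hx
    rw [hS, Finset.mem_Icc]; omega
  have hcardT : T.card = 9 := by
    rw [hT, List.toFinset_card_of_nodup hnd, hlen]
  have hcardS : S.card = 10 := by rw [hS]; decide
  have hcard1 : (S \ T).card = 1 := by
    rw [Finset.card_sdiff, Finset.inter_eq_left.mpr hTS, hcardS, hcardT]
  obtain ⟨m, hm⟩ := Finset.card_eq_one.mp hcard1
  have hmS : m ∈ S := (Finset.sdiff_subset) (hm ▸ Finset.mem_singleton_self m)
  have hmT : m ∉ T := by
    have : m ∈ S \ T := hm ▸ Finset.mem_singleton_self m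
    exact (Finset.mem_sdiff.mp this).2
  have hmb : 0 ≤ m ∧ m ≤ 9 := Finset.mem_Icc.mp hmS
  refine ⟨m, ?_, ?_⟩
  · apply pvScanA_first
    · rw [PySem.List.mem_pyRange_one]; omega
    · intro j hj
      rw [PySem.List.mem_pyRange_one] at hj
      rw [pvMark_getD ds hj.1 hj.2]
      constructor
      · intro h
        have hjT : j ∉ T := by
          rw [hT, List.mem_toFinset]
          simpa using h
        have hjS : j ∈ S := by rw [hS, Finset.mem_Icc]; omega
        have : j ∈ S \ T := Finset.mem_sdiff.mpr ⟨hjS, hjT⟩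
        rw [hm, Finset.mem_singleton] at this
        exact this
      · intro h
        subst h
        simp only [decide_eq_false_iff_not]
        rw [hT, List.mem_toFinset] at hmT
        exact hmT
  · have hsum : ds.sum = T.sum id := by
      rw [hT]
      rw [List.sum_toFinset _ hnd]
      simp
    have hsplit : (S \ T).sum id + T.sum id = S.sum id := Finset.sum_sdiff hTS
    have hSsum : S.sum id = 45 := by rw [hS]; decide
    have hmsum : (S \ T).sum id = m := by rw [hm, Finset.sum_singleton, id]
    rw [hsum]
    omega

-- ===== VERDICT (by name: the statement is the Claim_ definition above) =====
theorem get_available_digit_spec : Claim_equal_get_available_digit := by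
  intro number _
  unfold Spec_get_available_digit get_available_digit get_available_digit_alt
  rw [← pvMark_nil, pvLoopA_mark]
  set ds := pvDLow number 9 with hds
  have hmap : ds = (List.range 9).map
      (fun i => PySem.Int.mod (PySem.Int.floordiv number ((10:Int) ^ i)) 10) := pvDLow_map 9 number
  have hlen : ds.length = 9 := pvDLow_length 9 number
  have hbd : ∀ x ∈ ds, 0 ≤ x ∧ x < 10 := pvDLow_mem_bounds 9 number
  rw [← hmap]
  by_cases hnd : ds.Nodup
  · have h9 : (PySem.Set.ofList ds).length = 9 := by
      rw [(pvOfList_len_eq_iff_nodup ds).mpr hnd, hlen]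
    rw [pvProcD_pos ds [] (by simpa using hnd)]
    obtain ⟨m, h1, h2⟩ := pv_main ds hlen hbd hnd
    simp only [List.nil_append] at h1 ⊢
    rw [h1, if_neg (by omega), h2]
  · have h9 : (PySem.Set.ofList ds).length ≠ 9 := by
      intro hc
      exact hnd ((pvOfList_len_eq_iff_nodup ds).mp (by omega))
    rw [pvProcD_neg ds [] List.nodup_nil (by simpa using hnd)]
    rw [if_pos h9]
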